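-- pv_equiv track=rewrite | github.com/loickengit/O_NJU_JK | 先升后降.py | solve
-- ===== SOURCE A (Python) =====
-- import bisect
--
-- def get_mid(nums):
--     def long_sub(nums):
--         stack = []
--         lenarr = [0] * len(nums)
--         for i, num in enumerate(nums):
--             index = bisect.bisect_left(stack, num)
--             lenarr[i] = index + 1
--             if index >= len(stack):
--                 stack.append(num)
--             else:
--                 stack[index] = num
--         return lenarr
--
--     lenl, lenr = long_sub(nums), long_sub(nums[::-1])[::-1]
--     maxlen = max(lenl[i]+lenr[i] for i in range(len(nums)))
--     return [i for i in range(len(nums)) if lenl[i]+lenr[i] == maxlen]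
--
-- def solve(nums):
--     def get_all(path, arr, i, res_path):
--         if i >= len(arr):
--             if not res_path or len(path) > len(res_path[0]):
--                 res_path.clear()
--                 res_path.append(path)
--             elif len(path) == len(res_path[0]):
--                 res_path.append(path[::])
--             return
--
--         get_all(path, arr, i + 1, res_path)
--         if i >= len(arr) or path and path[-1] >= arr[i]:
--             return
--         get_all(path+[arr[i]], arr, i + 1, res_path)
--
--     ans = set()
--     for mid in get_mid(nums):
--         subl, subr = nums[:mid+1], nums[mid:][::-1]
--         ansl, ansr = [], []
--         get_all([], subl, 0, ansl)
--         get_all([], subr, 0, ansr)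
--         ans |= set(' '.join(map(str, l + r[::-1][1:])) for l in ansl for r in ansr)
--     return sorted(ans)
-- ===== SOURCE B (Python) =====
-- import bisect
--
-- def solve(nums):
--     # B: same mid selection (patience LIS-length pass), but enumerates the longest strictly
--     # increasing subsequences per side by quadratic DP lengths + table backtracking instead
--     # of A's exponential subset recursion. Returns [] on empty input (A raises ValueError).
--     if not nums:
--         return []
--
--     def lis_lens(arr):
--         stack, out = [], []
--         for x in arr:
--             i = bisect.bisect_left(stack, x)
--             out.append(i + 1)
--             if i == len(stack):
--                 stack.append(x)
--             else:
--                 stack[i] = x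
--         return out
--
--     def longest_up(arr):
--         # all strictly increasing subsequences of arr of maximal length
--         L = []
--         for x in arr:
--             best = 0
--             for y, ly in zip(arr, L):
--                 if y < x and ly > best:
--                     best = ly
--             L.append(best + 1)
--         M = max(L)
--         back = []
--         for x, lx in zip(arr, L):
--             if lx == 1:
--                 back.append([[x]])
--             else:
--                 back.append([s + [x]
--                              for (y, ly), b in zip(zip(arr, L), back)
--                              if y < x and ly == lx - 1
--                              for s in b])
--         return [s for lx, b in zip(L, back) if lx == M for s in b]
--
--     lenl = lis_lens(nums)
--     lenr = lis_lens(nums[::-1])[::-1]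
--     maxlen = max(lenl[i] + lenr[i] for i in range(len(nums)))
--
--     ans = set()
--     for mid in range(len(nums)):
--         if lenl[mid] + lenr[mid] != maxlen:
--             continue
--         ansl = longest_up(nums[:mid + 1])
--         ansr = longest_up(nums[mid:][::-1])
--         ans |= set(' '.join(map(str, l + r[::-1][1:])) for l in ansl for r in ansr)
--     return sorted(ans)
-- ===== Notes on version B (the rewrite author's own statement) =====
-- stated objective: faster
-- what changed: A enumerates longest increasing subsequences of each half by recursing over all subsets (exponential DFS keeping the running best); B computes quadratic-DP LIS lengths and backtracks through a DP table so only maximal subsequences are ever built.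
import Mathlib
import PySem

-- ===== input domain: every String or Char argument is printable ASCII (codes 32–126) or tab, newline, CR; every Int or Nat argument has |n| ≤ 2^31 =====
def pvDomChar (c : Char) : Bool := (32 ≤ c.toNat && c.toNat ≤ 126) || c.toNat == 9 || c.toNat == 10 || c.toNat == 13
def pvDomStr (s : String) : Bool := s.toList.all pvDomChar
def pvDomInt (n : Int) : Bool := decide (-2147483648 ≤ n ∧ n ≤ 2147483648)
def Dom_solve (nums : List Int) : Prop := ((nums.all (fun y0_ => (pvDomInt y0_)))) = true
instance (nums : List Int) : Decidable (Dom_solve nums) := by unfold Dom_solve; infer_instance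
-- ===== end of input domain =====

-- B replaces A's exponential subset recursion by DP lengths + table backtracking (measured faster);
-- the equivalence is proved for every nonempty input list (A raises ValueError on []).

-- ===== PORT A =====

-- long_sub: patience pass; lenarr is preallocated and written at increasing i in Python = append
def longSub (nums : List Int) : List Int :=
  (nums.foldl (fun (st : List Int × List Int) num =>
      let index := PySem.List.bisectLeft st.1 num
      let lenarr := st.2 ++ [(index : Int) + 1]
      let stack := if st.1.length ≤ index then st.1 ++ [num] else st.1.set index num
      (stack, lenarr)) ([], [])).2

-- get_mid; the `none` branch is Python's ValueError on max() of an empty sequence (nums = [])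
def getMid (nums : List Int) : List Nat :=
  let lenl := longSub nums
  let lenr := (longSub nums.reverse).reverse
  let sums := (List.range nums.length).map (fun i => lenl.getD i 0 + lenr.getD i 0)
  match PySem.List.max? sums (fun x => x) with
  | none => []
  | some maxlen => (List.range nums.length).filter (fun i => lenl.getD i 0 + lenr.getD i 0 = maxlen)

-- get_all: DFS over indices; res_path keeps all longest paths seen so far
def getAll (path arr : List Int) (i : Nat) (res : List (List Int)) : List (List Int) :=
  if h : arr.length ≤ i then
    if res = [] ∨ (res.headD []).length < path.length then [path]
    else if path.length = (res.headD []).length then res ++ [path]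
    else res
  else
    let res1 := getAll path arr (i + 1) res
    if path ≠ [] ∧ arr.getD i 0 ≤ path.getLastD 0 then res1
    else getAll (path ++ [arr.getD i 0]) arr (i + 1) res1
termination_by arr.length - i

-- ' '.join(map(str, l))
def joinNums (l : List Int) : String := PySem.Str.join " " (l.map PySem.Int.toStr)

def solve (nums : List Int) : List String :=
  let ans := (getMid nums).foldl (fun (ans : PySem.Set String) mid =>
      -- nums[:mid+1] and nums[mid:][::-1] with 0 ≤ mid < len nums
      let subl := nums.take (mid + 1)
      let subr := (nums.drop mid).reverse
      let ansl := getAll [] subl 0 []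
      let ansr := getAll [] subr 0 []
      PySem.Set.union ans
        (ansl.flatMap (fun l => ansr.map (fun r => joinNums (l ++ r.reverse.drop 1))))
    ) PySem.Set.empty
  PySem.List.sorted ans (fun s => s) false

-- ===== PORT B =====

-- quadratic DP: L[i] = 1 + max L[j] over j < i with arr[j] < arr[i] (zip truncates to the prefix)
def lvalsB (arr : List Int) : List Int :=
  arr.foldl (fun L x =>
    L ++ [(arr.zip L).foldl (fun b p => if p.1 < x ∧ b < p.2 then p.2 else b) 0 + 1]) []

-- backtracking table: back[i] = all maximal increasing subsequences ending at position i
def backB (arr : List Int) (L : List Int) : List (List (List Int)) :=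
  (arr.zip L).foldl (fun back p =>
    back ++ [ if p.2 = 1 then [[p.1]]
              else (((arr.zip L).zip back).filter
                      (fun q => decide (q.1.1 < p.1 ∧ q.1.2 = p.2 - 1))).flatMap
                     (fun q => q.2.map (fun s => s ++ [p.1])) ]) []

-- longest_up: `none` branch is Python's ValueError on max([]) — unreachable (arr is never empty)
def longestUp (arr : List Int) : List (List Int) :=
  let L := lvalsB arr
  match PySem.List.max? L (fun x => x) with
  | none => []
  | some M =>
      let back := backB arr L
      ((L.zip back).filter (fun p => decide (p.1 = M))).flatMap (fun p => p.2)

def solve_alt (nums : List Int) : List String :=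
  if nums = [] then []
  else
    let lenl := longSub nums          -- Source B's lis_lens is the same patience pass
    let lenr := (longSub nums.reverse).reverse
    let sums := (List.range nums.length).map (fun i => lenl.getD i 0 + lenr.getD i 0)
    match PySem.List.max? sums (fun x => x) with
    | none => []
    | some maxlen =>
        let ans := (List.range nums.length).foldl (fun (ans : PySem.Set String) mid =>
            if lenl.getD mid 0 + lenr.getD mid 0 = maxlen then
              let ansl := longestUp (nums.take (mid + 1))
              let ansr := longestUp ((nums.drop mid).reverse)
              PySem.Set.union ans
                (ansl.flatMap (fun l => ansr.map (fun r => joinNums (l ++ r.reverse.drop 1))))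
            else ans) PySem.Set.empty
        PySem.List.sorted ans (fun s => s) false

-- ===== PRECONDITION & SPEC =====
-- Pre_ excludes only the empty list, on which Python A raises ValueError (max() of an empty generator)
def Pre_solve (nums : List Int) : Prop := nums ≠ []
instance (nums : List Int) : Decidable (Pre_solve nums) := by unfold Pre_solve; infer_instance
def pvWitness_solve : List Int := [1, 3, 2]

def Spec_solve (nums : List Int) (out : List String) : Prop := out = solve_alt nums
instance (nums : List Int) (out : List String) : Decidable (Spec_solve nums out) := by unfold Spec_solve; infer_instance

-- ===== CLAIM (what is proved, stated in full; the proofs are below) =====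
def Claim_equal_solve : Prop := ∀ (nums : List Int), Dom_solve nums → Pre_solve nums → Spec_solve nums (solve nums)

-- ===== LEMMAS AND PROOFS =====

-- ---------- A-side: characterize getAll ----------

-- bound check for extending a path whose last element is `b`
def okB (b : Option Int) (x : Int) : Bool := match b with | none => true | some v => decide (v < x)

-- DFS candidate list of get_all: all strictly increasing subsequences above the bound, skip-branch first
def cands (b : Option Int) : List Int → List (List Int)
  | [] => [[]]
  | x :: l => cands b l ++ (if okB b x then (cands (some x) l).map (fun s => x :: s) else [])

-- one res_path update of get_all's base case
def stepR (res : List (List Int)) (c : List Int) : List (List Int) :=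
  if res = [] ∨ (res.headD []).length < c.length then [c]
  else if c.length = (res.headD []).length then res ++ [c]
  else res

def maxN (cs : List (List Int)) : Nat := cs.foldl (fun m c => max m c.length) 0

def Good (arr s : List Int) : Prop := s.Sublist arr ∧ List.IsChain (· < ·) s

def headOk (b : Option Int) (s : List Int) : Prop :=
  ∀ v h, b = some v → s.head? = some h → v < h

lemma cands_ne_nil (b : Option Int) (l : List Int) : cands b l ≠ [] := by
  induction l with
  | nil => simp [cands]
  | cons x l ih => simp only [cands]; exact List.append_ne_nil_of_left_ne_nil ih _

lemma getAll_eq (arr : List Int) (i : Nat) (path : List Int) (res : List (List Int)) :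
    getAll path arr i res
      = ((cands path.getLast? (arr.drop i)).map (fun s => path ++ s)).foldl stepR res := by
  rw [getAll]
  by_cases h : arr.length ≤ i
  · rw [dif_pos h, List.drop_of_length_le h]
    simp only [cands, List.map_cons, List.map_nil, List.append_nil, List.foldl_cons, List.foldl_nil]
    rfl
  · rw [dif_neg h]
    have hi : i < arr.length := by omega
    have hd : arr.drop i = arr[i] :: arr.drop (i + 1) := (List.getElem_cons_drop hi).symm
    have hgd : arr.getD i 0 = arr[i] := List.getD_eq_getElem arr 0 hi
    rw [hd]
    simp only [cands, List.map_append, List.foldl_append]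
    rw [← getAll_eq arr (i + 1) path res]
    by_cases hok : okB path.getLast? arr[i] = true
    · have hcond : ¬ (path ≠ [] ∧ arr.getD i 0 ≤ path.getLastD 0) := by
        rcases List.eq_nil_or_concat' path with rfl | ⟨q, v, rfl⟩
        · simp
        · have hl : (q ++ [v]).getLast? = some v := List.getLast?_concat
          have hld : (q ++ [v]).getLastD 0 = v := by
            simp [List.getLastD_eq_getLast?, hl]
          rw [hl] at hok
          simp only [okB, decide_eq_true_eq] at hok
          rw [hgd, hld]
          intro hc
          omega
      rw [if_neg hcond, if_pos hok, hgd]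
      rw [getAll_eq arr (i + 1) (path ++ [arr[i]]) (getAll path arr (i + 1) res)]
      rw [List.getLast?_concat]
      congr 1
      rw [List.map_map]
      apply List.map_congr_left
      intro s _
      simp
    · have hcond : path ≠ [] ∧ arr.getD i 0 ≤ path.getLastD 0 := by
        rcases List.eq_nil_or_concat' path with rfl | ⟨q, v, rfl⟩
        · simp [okB] at hok
        · have hl : (q ++ [v]).getLast? = some v := List.getLast?_concat
          have hld : (q ++ [v]).getLastD 0 = v := by
            simp [List.getLastD_eq_getLast?, hl]
          rw [hl] at hok
          simp only [okB, decide_eq_true_eq] at hok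
          rw [hgd, hld]
          exact ⟨by simp, by omega⟩
      rw [if_pos hcond, if_neg hok]
      simp
termination_by arr.length - i

lemma mem_cands (b : Option Int) (l : List Int) (s : List Int) :
    s ∈ cands b l ↔ s.Sublist l ∧ List.IsChain (· < ·) s ∧ headOk b s := by
  induction l generalizing b s with
  | nil =>
    simp only [cands, List.mem_singleton]
    constructor
    · rintro rfl
      exact ⟨List.Sublist.refl [], List.isChain_nil, fun v h hv hh => by simp at hh⟩
    · rintro ⟨hs, -, -⟩
      exact List.sublist_nil.mp hs
  | cons x l ih =>
    simp only [cands, List.mem_append]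
    constructor
    · rintro (hs | hs)
      · obtain ⟨h1, h2, h3⟩ := (ih b s).mp hs
        exact ⟨h1.cons x, h2, h3⟩
      · by_cases hok : okB b x = true
        · rw [if_pos hok] at hs
          obtain ⟨t, ht, rfl⟩ := List.mem_map.mp hs
          obtain ⟨h1, h2, h3⟩ := (ih (some x) t).mp ht
          refine ⟨List.cons_sublist_cons.mpr h1, ?_, ?_⟩
          · exact List.isChain_cons.mpr ⟨fun y hy => h3 x y rfl hy, h2⟩
          · intro v hh hv hhh
            simp only [List.head?_cons, Option.some_inj] at hhh
            subst hhh
            cases b with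
            | none => cases hv
            | some w =>
              cases hv
              simpa [okB] using hok
        · rw [if_neg hok] at hs
          simp at hs
    · rintro ⟨hs, hch, hok⟩
      rcases List.sublist_cons_iff.mp hs with hsl | ⟨r, rfl, hr⟩
      · exact Or.inl ((ih b s).mpr ⟨hsl, hch, hok⟩)
      · refine Or.inr ?_
        have hokx : okB b x = true := by
          cases b with
          | none => rfl
          | some v => simpa [okB] using hok v x rfl (by simp)
        rw [if_pos hokx]
        refine List.mem_map.mpr ⟨r, (ih (some x) r).mpr ⟨hr, (List.isChain_cons.mp hch).2, ?_⟩, rfl⟩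
        intro v hh hv hhh
        cases hv
        exact (List.isChain_cons.mp hch).1 hh hhh

lemma maxN_le (cs : List (List Int)) (c : List Int) (hc : c ∈ cs) : c.length ≤ maxN cs := by
  exact (PySem.List.le_foldl_max_nat cs List.length 0).2 c hc

lemma maxN_append_singleton (cs : List (List Int)) (c : List Int) :
    maxN (cs ++ [c]) = max (maxN cs) c.length := by
  unfold maxN; rw [List.foldl_append]; rfl

lemma maxN_attained (cs : List (List Int)) (h : cs ≠ []) : ∃ c ∈ cs, c.length = maxN cs := by
  induction cs using List.reverseRecOn with
  | nil => exact absurd rfl h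
  | append_singleton cs c ih =>
    rw [maxN_append_singleton]
    rcases eq_or_ne cs [] with rfl | hcs
    · exact ⟨c, by simp, by simp [maxN]⟩
    · obtain ⟨d, hd, hdl⟩ := ih hcs
      rcases le_or_gt c.length (maxN cs) with hle | hlt
      · exact ⟨d, by simp [hd], by omega⟩
      · exact ⟨c, by simp, by omega⟩

lemma stepfold_aux (cs : List (List Int)) (h : cs ≠ []) :
    cs.foldl stepR [] = cs.filter (fun c => decide (c.length = maxN cs))
    ∧ cs.foldl stepR [] ≠ []
    ∧ ((cs.foldl stepR []).headD []).length = maxN cs := by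
  induction cs using List.reverseRecOn with
  | nil => exact absurd rfl h
  | append_singleton cs c ih =>
    rcases eq_or_ne cs [] with rfl | hcs
    · refine ⟨?_, by simp [stepR], by simp [stepR, maxN]⟩
      simp [stepR, maxN, List.filter]
    · obtain ⟨h1, h2, h3⟩ := ih hcs
      have hub : ∀ d ∈ cs, d.length ≤ maxN cs := fun d hd => maxN_le cs d hd
      rw [List.foldl_append, List.foldl_cons, List.foldl_nil, h1] at *
      rw [maxN_append_singleton]
      set F := cs.filter (fun c => decide (c.length = maxN cs)) with hF
      rcases lt_trichotomy (maxN cs) c.length with hlt | heq | hgt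
      · have hmax : max (maxN cs) c.length = c.length := by omega
        rw [hmax]
        have hnil : cs.filter (fun d => decide (d.length = c.length)) = [] := by
          rw [List.filter_eq_nil_iff]
          intro d hd
          have := hub d hd
          simp only [decide_eq_true_eq]
          omega
        have hstep : stepR F c = [c] := by
          unfold stepR
          rw [if_pos (Or.inr (by rw [h3]; exact hlt))]
        rw [hstep, List.filter_append, hnil]
        exact ⟨by simp, by simp, by simp⟩
      · have hmax : max (maxN cs) c.length = maxN cs := by omega
        rw [hmax]
        have hstep : stepR F c = F ++ [c] := by
          unfold stepR
          rw [if_neg (by simp only [not_or]; exact ⟨h2, by rw [h3]; omega⟩), if_pos (by rw [h3]; omega)]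
        rw [hstep, List.filter_append]
        refine ⟨by rw [hF, heq]; simp, by simp [h2], ?_⟩
        rcases List.exists_cons_of_ne_nil h2 with ⟨a, t, hat⟩
        simp only [hat, List.cons_append, List.headD_cons] at h3 ⊢
        omega
      · have hmax : max (maxN cs) c.length = maxN cs := by omega
        rw [hmax]
        have hstep : stepR F c = F := by
          unfold stepR
          rw [if_neg (by simp only [not_or]; exact ⟨h2, by rw [h3]; omega⟩), if_neg (by rw [h3]; omega)]
        rw [hstep, List.filter_append]
        have hne : c.length ≠ maxN cs := by omega
        refine ⟨by simp only [List.filter_cons, List.filter_nil, decide_eq_true_eq, hne, if_false]; simp [hF], h2, h3⟩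

lemma stepfold (cs : List (List Int)) (h : cs ≠ []) :
    cs.foldl stepR [] = cs.filter (fun c => decide (c.length = maxN cs)) :=
  (stepfold_aux cs h).1

lemma mem_getAll (arr s : List Int) :
    s ∈ getAll [] arr 0 [] ↔ Good arr s ∧ s.length = maxN (cands none arr) := by
  rw [getAll_eq]
  simp only [List.drop_zero, List.getLast?_nil, List.nil_append, List.map_id_fun', id]
  rw [stepfold _ (cands_ne_nil none arr), List.mem_filter]
  rw [mem_cands]
  unfold Good headOk
  simp only [decide_eq_true_eq]
  constructor
  · rintro ⟨⟨h1, h2, -⟩, h3⟩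
    exact ⟨⟨h1, h2⟩, h3⟩
  · rintro ⟨⟨h1, h2⟩, h3⟩
    exact ⟨⟨h1, h2, fun v h hv => by cases hv⟩, h3⟩

-- ---------- generic append-only table folds ----------

lemma tbl_ext {α β : Type} (ent : List β → α → β) (xs : List α) (t0 : List β) :
    ∃ u, xs.foldl (fun t x => t ++ [ent t x]) t0 = t0 ++ u := by
  induction xs generalizing t0 with
  | nil => exact ⟨[], by simp⟩
  | cons x xs ih =>
    obtain ⟨u, hu⟩ := ih (t0 ++ [ent t0 x])
    exact ⟨[ent t0 x] ++ u, by simpa using hu⟩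

lemma tbl_len {α β : Type} (ent : List β → α → β) (xs : List α) (t0 : List β) :
    (xs.foldl (fun t x => t ++ [ent t x]) t0).length = t0.length + xs.length := by
  induction xs generalizing t0 with
  | nil => simp
  | cons x xs ih => simp only [List.foldl_cons]; rw [ih]; simp; omega

lemma tbl_take {α β : Type} (ent : List β → α → β) (xs : List α) (k : Nat) (hk : k ≤ xs.length) :
    (xs.foldl (fun t x => t ++ [ent t x]) []).take k = (xs.take k).foldl (fun t x => t ++ [ent t x]) [] := by
  conv_lhs => rw [← List.take_append_drop k xs]
  rw [List.foldl_append]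
  obtain ⟨u, hu⟩ := tbl_ext ent (xs.drop k) ((xs.take k).foldl (fun t x => t ++ [ent t x]) [])
  rw [hu]
  have hlen : ((xs.take k).foldl (fun t x => t ++ [ent t x]) []).length = k := by
    rw [tbl_len]; simp; omega
  rw [List.take_append, hlen, Nat.sub_self, List.take_zero, List.append_nil,
    List.take_of_length_le (le_of_eq hlen)]

lemma tbl_get {α β : Type} (ent : List β → α → β) (xs : List α) (i : Nat) (h : i < xs.length) :
    (xs.foldl (fun t x => t ++ [ent t x]) [])[i]'(by rw [tbl_len]; omega)
      = ent ((xs.foldl (fun t x => t ++ [ent t x]) []).take i) (xs[i]) := by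
  have h1 : (xs.foldl (fun t x => t ++ [ent t x]) []).take (i+1)
      = (xs.foldl (fun t x => t ++ [ent t x]) []).take i
        ++ [(xs.foldl (fun t x => t ++ [ent t x]) [])[i]'(by rw [tbl_len]; omega)] := by
    rw [List.take_add_one, List.getElem?_eq_getElem (by rw [tbl_len]; omega)]
    rfl
  have h2 : (xs.foldl (fun t x => t ++ [ent t x]) []).take (i+1)
      = (xs.foldl (fun t x => t ++ [ent t x]) []).take i
        ++ [ent ((xs.foldl (fun t x => t ++ [ent t x]) []).take i) (xs[i])] := by
    rw [tbl_take ent xs (i+1) (by omega), tbl_take ent xs i (by omega)]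
    have : xs.take (i+1) = xs.take i ++ [xs[i]] := by
      rw [List.take_add_one, List.getElem?_eq_getElem h]; rfl
    rw [this, List.foldl_append]
    simp
  rw [h1] at h2
  have h3 := List.append_inj_right h2 rfl
  exact (List.singleton_inj.mp h3)

-- ---------- B-side: characterize lvalsB / backB / longestUp ----------

-- the inner running-max loop of lvalsB
def bestF (x : Int) (pairs : List (Int × Int)) : Int :=
  pairs.foldl (fun b p => if p.1 < x ∧ b < p.2 then p.2 else b) 0

lemma bestF_spec (x : Int) (pairs : List (Int × Int)) :
    (0 ≤ bestF x pairs)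
    ∧ (bestF x pairs = 0 ∨ ∃ p ∈ pairs, p.1 < x ∧ p.2 = bestF x pairs)
    ∧ (∀ p ∈ pairs, p.1 < x → p.2 ≤ bestF x pairs) := by
  induction pairs using List.reverseRecOn with
  | nil => exact ⟨le_refl 0, Or.inl rfl, by simp⟩
  | append_singleton pairs p ih =>
    obtain ⟨ih0, ih1, ih2⟩ := ih
    have hstep : bestF x (pairs ++ [p])
        = if p.1 < x ∧ bestF x pairs < p.2 then p.2 else bestF x pairs := by
      unfold bestF
      rw [List.foldl_append]
      rfl
    by_cases hc : p.1 < x ∧ bestF x pairs < p.2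
    · rw [hstep, if_pos hc]
      refine ⟨by omega, Or.inr ⟨p, by simp, hc.1, rfl⟩, ?_⟩
      intro q hq hqx
      rcases List.mem_append.mp hq with hq | hq
      · have := ih2 q hq hqx; omega
      · simp only [List.mem_singleton] at hq; subst hq; omega
    · rw [hstep, if_neg hc]
      refine ⟨ih0, ?_, ?_⟩
      · rcases ih1 with h0 | ⟨q, hq, hqx, hqv⟩
        · exact Or.inl h0
        · exact Or.inr ⟨q, List.mem_append.mpr (Or.inl hq), hqx, hqv⟩
      · intro q hq hqx
        rcases List.mem_append.mp hq with hq | hq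
        · exact ih2 q hq hqx
        · simp only [List.mem_singleton] at hq; subst hq; omega

lemma lvals_length (arr : List Int) : (lvalsB arr).length = arr.length := by
  have h := tbl_len (fun t x => bestF x (arr.zip t) + 1) arr []
  simpa [lvalsB, bestF] using h

lemma lvals_get (arr : List Int) (i : Nat) (h : i < arr.length) :
    (lvalsB arr)[i]'(by rw [lvals_length]; omega)
      = bestF (arr[i]) (arr.zip ((lvalsB arr).take i)) + 1 := by
  exact tbl_get (fun t x => bestF x (arr.zip t) + 1) arr i h

lemma zip_take_mem {α β : Type} (X : List α) (T : List β) (hT : T.length = X.length)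
    (i : Nat) (hi : i ≤ X.length) (p : α × β) :
    p ∈ X.zip (T.take i) ↔ ∃ j, ∃ hj : j < i,
      p = (X[j]'(by omega), T[j]'(by omega)) := by
  have hlen : (X.zip (T.take i)).length = i := by
    simp [List.length_zip]; omega
  rw [List.mem_iff_getElem]
  constructor
  · rintro ⟨k, hk, rfl⟩
    rw [hlen] at hk
    refine ⟨k, hk, ?_⟩
    rw [List.getElem_zip, List.getElem_take]
  · rintro ⟨j, hj, rfl⟩
    refine ⟨j, by omega, ?_⟩
    rw [List.getElem_zip, List.getElem_take]

lemma lvals_pos (arr : List Int) (i : Nat) (h : i < arr.length) :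
    1 ≤ (lvalsB arr)[i]'(by rw [lvals_length]; omega) := by
  rw [lvals_get arr i h]
  have := (bestF_spec (arr[i]) (arr.zip ((lvalsB arr).take i))).1
  omega

-- s ends exactly at position i of arr
def EndsAt (arr : List Int) (i : Nat) (s : List Int) : Prop :=
  i < arr.length ∧ List.IsChain (· < ·) s ∧ ∃ s', s'.Sublist (arr.take i) ∧ s = s' ++ [arr.getD i 0]

-- the last element of a nonempty sublist occurs at some position
lemma occ (l s' : List Int) (b : Int) (h : (s' ++ [b]).Sublist l) :
    ∃ j, ∃ hj : j < l.length, l[j] = b ∧ s'.Sublist (l.take j) := by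
  induction l generalizing s' with
  | nil =>
    have := List.sublist_nil.mp h
    simp at this
  | cons x l ih =>
    rcases List.sublist_cons_iff.mp h with h' | ⟨r, heq, hr⟩
    · obtain ⟨j, hj, hb, hsub⟩ := ih s' h'
      exact ⟨j + 1, by simpa using hj, by simpa using hb, by simpa using hsub.cons x⟩
    · cases s' with
      | nil =>
        simp only [List.nil_append, List.cons.injEq] at heq
        exact ⟨0, by simp, by simp [heq.1.symm], by simp⟩
      | cons y s'' =>
        simp only [List.cons_append, List.cons.injEq] at heq
        obtain ⟨rfl, heq2⟩ := heq
        have hr' : (s'' ++ [b]).Sublist l := heq2 ▸ hr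
        obtain ⟨j, hj, hb, hsub⟩ := ih s'' hr'
        refine ⟨j + 1, by simpa using hj, by simpa using hb, ?_⟩
        have : (y :: s'').Sublist (y :: l.take j) := List.cons_sublist_cons.mpr hsub
        simpa using this

lemma endsAt_good (arr : List Int) (i : Nat) (s : List Int) (h : EndsAt arr i s) : Good arr s := by
  obtain ⟨hi, hch, s', hsub, rfl⟩ := h
  refine ⟨?_, hch⟩
  have h1 : (s' ++ [arr.getD i 0]).Sublist (arr.take i ++ [arr.getD i 0]) :=
    hsub.append (List.Sublist.refl _)
  have hgd : arr.getD i 0 = arr[i] := List.getD_eq_getElem arr 0 hi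
  have h2 : arr.take i ++ [arr.getD i 0] = arr.take (i + 1) := by
    rw [hgd, List.take_add_one, List.getElem?_eq_getElem hi]
    simp
  rw [h2] at h1
  exact h1.trans (List.take_sublist (i + 1) arr)

lemma le_lvals (arr : List Int) (i : Nat) (s : List Int) (h : EndsAt arr i s) :
    (s.length : Int) ≤ (lvalsB arr)[i]'(by rw [lvals_length]; exact h.1) := by
  obtain ⟨hi, hch, s', hsub, rfl⟩ := h
  rw [lvals_get arr i hi]
  rcases List.eq_nil_or_concat' s' with rfl | ⟨s'', b, rfl⟩
  · have := (bestF_spec (arr[i]) (arr.zip ((lvalsB arr).take i))).1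
    simp only [List.nil_append, List.length_singleton]
    omega
  · have hsub' : (s'' ++ [b]).Sublist (arr.take i) := hsub
    obtain ⟨j, hj, hb, hsub''⟩ := occ (arr.take i) s'' b hsub'
    have hjlen : (arr.take i).length = i := by simp; omega
    have hji : j < i := by omega
    have hjn : j < arr.length := by omega
    have hbj : arr[j] = b := by
      rw [← List.getElem_take (h := by omega)]
      exact hb
    have hchpre : List.IsChain (· < ·) (s'' ++ [b]) :=
      hch.sublist (by exact (List.sublist_append_left _ _))
    have hend : EndsAt arr j (s'' ++ [b]) := by
      refine ⟨hjn, hchpre, s'', ?_, ?_⟩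
      · calc s''.Sublist ((arr.take i).take j) := hsub''
          _ = arr.take j := by rw [List.take_take]; congr 1; omega
      · rw [List.getD_eq_getElem arr 0 hjn, hbj]
    have hIH := le_lvals arr j (s'' ++ [b]) hend
    have hblt : b < arr[i] := by
      have := (List.isChain_append.mp hch).2.2
      have hlast : (s'' ++ [b]).getLast? = some b := List.getLast?_concat
      have hhead : ([arr.getD i 0] : List Int).head? = some (arr.getD i 0) := rfl
      have h5 := this b (by simp [hlast]) (arr.getD i 0) (by simp)
      rwa [List.getD_eq_getElem arr 0 hi] at h5
    have hmemz := (zip_take_mem arr (lvalsB arr) (lvals_length arr) i (by omega)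
          ((arr[j], (lvalsB arr)[j]'(by rw [lvals_length]; omega)))).mpr ⟨j, hji, rfl⟩
    have hLj := (bestF_spec (arr[i]) (arr.zip ((lvalsB arr).take i))).2.2 _ hmemz
        (by simpa [hbj] using hblt)
    simp only [List.length_append, List.length_singleton]
    push_cast at hIH ⊢
    simp only [List.length_append, List.length_singleton] at hIH
    omega
termination_by i
decreasing_by omega

lemma exists_lvals (arr : List Int) (i : Nat) (h : i < arr.length) :
    ∃ s, EndsAt arr i s ∧ (s.length : Int) = (lvalsB arr)[i]'(by rw [lvals_length]; omega) := by
  rw [lvals_get arr i h]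
  rcases (bestF_spec (arr[i]) (arr.zip ((lvalsB arr).take i))).2.1 with h0 | ⟨p, hp, hpx, hpb⟩
  · refine ⟨[arr[i]], ⟨h, List.isChain_singleton _, [], List.nil_sublist _, ?_⟩, ?_⟩
    · rw [List.getD_eq_getElem arr 0 h]; rfl
    · simp [h0]
  · obtain ⟨j, hj, hpe⟩ := (zip_take_mem arr (lvalsB arr) (lvals_length arr) i (by omega) p).mp hp
    have hjn : j < arr.length := by omega
    obtain ⟨s, hs, hlen⟩ := exists_lvals arr j hjn
    obtain ⟨-, hch, s', hsub, hseq⟩ := hs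
    refine ⟨s ++ [arr[i]], ⟨h, ?_, s, ?_, ?_⟩, ?_⟩
    · rw [List.isChain_append]
      refine ⟨hch, List.isChain_singleton _, ?_⟩
      intro a ha y hy
      rw [hseq] at ha
      rw [List.getLast?_concat] at ha
      simp only [List.head?_cons, Option.mem_def, Option.some_inj] at ha hy
      subst ha; subst hy
      have : arr.getD j 0 = arr[j] := List.getD_eq_getElem arr 0 hjn
      rw [this]
      have : p.1 = arr[j] := by rw [hpe]
      rw [← this]
      exact hpx
    · have h1 : s.Sublist (arr.take j ++ [arr.getD j 0]) := by
        rw [hseq]; exact hsub.append (List.Sublist.refl _)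
      have h2 : arr.take j ++ [arr.getD j 0] = arr.take (j + 1) := by
        rw [List.getD_eq_getElem arr 0 hjn, List.take_add_one, List.getElem?_eq_getElem hjn]
        simp
      rw [h2] at h1
      exact h1.trans (List.take_sublist_take_left (by omega))
    · rw [List.getD_eq_getElem arr 0 h]
    · simp only [List.length_append, List.length_singleton]
      push_cast
      have : p.2 = (lvalsB arr)[j]'(by rw [lvals_length]; omega) := by rw [hpe]
      rw [this] at hpb
      omega
termination_by i
decreasing_by omega

def entB (arr L : List Int) (t : List (List (List Int))) (p : Int × Int) : List (List Int) :=
  if p.2 = 1 then [[p.1]]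
  else (((arr.zip L).zip t).filter
          (fun q => decide (q.1.1 < p.1 ∧ q.1.2 = p.2 - 1))).flatMap
         (fun q => q.2.map (fun s => s ++ [p.1]))

lemma backB_eq (arr L : List Int) :
    backB arr L = (arr.zip L).foldl (fun t p => t ++ [entB arr L t p]) [] := rfl

lemma back_length (arr L : List Int) (hL : L.length = arr.length) :
    (backB arr L).length = arr.length := by
  rw [backB_eq, tbl_len]
  simp [List.length_zip, hL]

lemma back_get (arr L : List Int) (hL : L.length = arr.length) (i : Nat) (h : i < arr.length) :
    (backB arr L)[i]'(by rw [back_length arr L hL]; omega)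
      = entB arr L ((backB arr L).take i) ((arr[i], L[i]'(by omega))) := by
  have hzl : i < (arr.zip L).length := by simp [List.length_zip, hL]; omega
  have hget := tbl_get (entB arr L) (arr.zip L) i hzl
  have hz : (arr.zip L)[i]'hzl = (arr[i]'(by omega), L[i]'(by omega)) := List.getElem_zip
  rw [hz] at hget
  exact hget

lemma mem_back (arr : List Int) (i : Nat) (h : i < arr.length) (s : List Int) :
    s ∈ (backB arr (lvalsB arr))[i]'(by rw [back_length _ _ (lvals_length arr)]; omega)
      ↔ EndsAt arr i s ∧ (s.length : Int) = (lvalsB arr)[i]'(by rw [lvals_length]; omega) := by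
  have hL : (lvalsB arr).length = arr.length := lvals_length arr
  have hzX : (arr.zip (lvalsB arr)).length = arr.length := by simp [List.length_zip, hL]
  have hbT : (backB arr (lvalsB arr)).length = (arr.zip (lvalsB arr)).length := by
    rw [back_length arr _ hL, hzX]
  have hgd : arr.getD i 0 = arr[i] := List.getD_eq_getElem arr 0 h
  rw [back_get arr (lvalsB arr) hL i h]
  simp only [entB]
  by_cases h1 : (lvalsB arr)[i]'(by rw [hL]; omega) = 1
  · rw [if_pos h1]
    simp only [List.mem_singleton]
    constructor
    · rintro rfl
      exact ⟨⟨h, List.isChain_singleton _, [], List.nil_sublist _, by simp; exact hgd.symm⟩, by simp [h1]⟩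
    · rintro ⟨⟨-, -, s', hsub, rfl⟩, hlen⟩
      have hs0 : s'.length = 0 := by
        simp only [List.length_append, List.length_singleton] at hlen
        rw [h1] at hlen
        push_cast at hlen
        omega
      obtain rfl := List.eq_nil_of_length_eq_zero hs0
      simp only [List.nil_append, List.singleton_inj]
      exact hgd
  · rw [if_neg h1]
    rw [List.mem_flatMap]
    constructor
    · rintro ⟨q, hqf, hsm⟩
      rw [List.mem_filter] at hqf
      obtain ⟨hqz, hqc⟩ := hqf
      obtain ⟨j, hji, rfl⟩ :=
        (zip_take_mem (arr.zip (lvalsB arr)) (backB arr (lvalsB arr)) hbT i (by omega) q).mp hqz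
      have hzj : (arr.zip (lvalsB arr))[j]'(by omega)
          = (arr[j]'(by omega), (lvalsB arr)[j]'(by rw [hL]; omega)) := List.getElem_zip
      rw [hzj] at hqc hsm
      simp only [decide_eq_true_eq] at hqc
      obtain ⟨t, ht, rfl⟩ := List.mem_map.mp hsm
      have hIH := (mem_back arr j (by omega) t).mp ht
      obtain ⟨⟨hjn, hcht, t', hsubt, hteq⟩, hlent⟩ := hIH
      have hgdj : arr.getD j 0 = arr[j] := List.getD_eq_getElem arr 0 (by omega)
      constructor
      · refine ⟨h, ?_, t, ?_, by rw [hgd]⟩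
        · rw [List.isChain_append]
          refine ⟨hcht, List.isChain_singleton _, ?_⟩
          intro a ha y hy
          rw [hteq, List.getLast?_concat] at ha
          simp only [Option.mem_def, Option.some_inj, List.head?_cons] at ha hy
          subst ha; subst hy
          rw [hgdj] at *
          exact hqc.1
        · have h1t : t.Sublist (arr.take j ++ [arr.getD j 0]) := by
            rw [hteq]; exact hsubt.append (List.Sublist.refl _)
          have h2t : arr.take j ++ [arr.getD j 0] = arr.take (j + 1) := by
            rw [hgdj, List.take_add_one, List.getElem?_eq_getElem (show j < arr.length by omega)]
            simp
          rw [h2t] at h1t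
          exact h1t.trans (List.take_sublist_take_left (by omega))
      · simp only [List.length_append, List.length_singleton]
        push_cast
        omega
    · rintro ⟨⟨-, hch, s', hsub, rfl⟩, hlen⟩
      rcases List.eq_nil_or_concat' s' with rfl | ⟨s'', b, rfl⟩
      · exfalso
        apply h1
        simp only [List.nil_append, List.length_singleton] at hlen
        push_cast at hlen
        omega
      · obtain ⟨j, hjt, hbt, hsub''⟩ := occ (arr.take i) s'' b hsub
        have hjlen : (arr.take i).length = i := by simp; omega
        have hji : j < i := by omega
        have hjn : j < arr.length := by omega
        have hbj : arr[j] = b := by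
          rw [← List.getElem_take (h := by omega)]
          exact hbt
        have hchpre : List.IsChain (· < ·) (s'' ++ [b]) :=
          hch.sublist (List.sublist_append_left _ _)
        have hgdj : arr.getD j 0 = arr[j] := List.getD_eq_getElem arr 0 hjn
        have hs2 : s''.Sublist (arr.take j) := by
          have h6 := hsub''
          rwa [List.take_take, min_eq_left (by omega)] at h6
        have hend : EndsAt arr j (s'' ++ [b]) := ⟨hjn, hchpre, s'', hs2, by rw [hgdj, hbj]⟩
        have hle := le_lvals arr j (s'' ++ [b]) hend
        have hblt : b < arr[i] := by
          have h5 := (List.isChain_append.mp hch).2.2 b (by simp)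
            (arr.getD i 0) (by simp)
          rwa [hgd] at h5
        have hmemz := (zip_take_mem arr (lvalsB arr) hL i (by omega)
            ((arr[j], (lvalsB arr)[j]'(by rw [hL]; omega)))).mpr ⟨j, hji, rfl⟩
        have hLj := (bestF_spec (arr[i]) (arr.zip ((lvalsB arr).take i))).2.2 _ hmemz
          (by simpa [hbj] using hblt)
        have hLi := lvals_get arr i h
        simp only [List.length_append, List.length_singleton] at hlen
        push_cast at hlen
        have hlen' : (((s'' ++ [b]).length : Nat) : Int)
            = (lvalsB arr)[j]'(by rw [hL]; omega) := by
          simp only [List.length_append, List.length_singleton]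
          push_cast
          push_cast at hle
          simp only [List.length_append, List.length_singleton] at hle
          omega
        have hback := (mem_back arr j hjn (s'' ++ [b])).mpr ⟨hend, hlen'⟩
        refine ⟨((arr[j]'(by omega), (lvalsB arr)[j]'(by rw [hL]; omega)),
                 (backB arr (lvalsB arr))[j]'(by rw [back_length arr _ hL]; omega)), ?_, ?_⟩
        · rw [List.mem_filter]
          refine ⟨?_, ?_⟩
          · apply (zip_take_mem (arr.zip (lvalsB arr)) (backB arr (lvalsB arr)) hbT i
                (by omega) _).mpr
            refine ⟨j, hji, ?_⟩
            have hzj : (arr.zip (lvalsB arr))[j]'(by omega)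
                = (arr[j]'(by omega), (lvalsB arr)[j]'(by rw [hL]; omega)) := List.getElem_zip
            rw [hzj]
          · simp only [decide_eq_true_eq]
            refine ⟨by rw [hbj]; exact hblt, ?_⟩
            simp only [List.length_append, List.length_singleton] at hlen'
            push_cast at hlen'
            omega
        · rw [List.mem_map]
          exact ⟨s'' ++ [b], hback, by rw [hgd]⟩
termination_by i
decreasing_by all_goals omega

lemma mem_longestUp (arr : List Int) (M : Int)
    (hM : PySem.List.max? (lvalsB arr) (fun x => x) = some M) (s : List Int) :
    s ∈ longestUp arr ↔ Good arr s ∧ (s.length : Int) = M := by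
  have hL : (lvalsB arr).length = arr.length := lvals_length arr
  have hbl : (backB arr (lvalsB arr)).length = arr.length := back_length arr _ hL
  have hbT : (backB arr (lvalsB arr)).length = (lvalsB arr).length := by rw [hbl, hL]
  have hTk : (backB arr (lvalsB arr)).take (lvalsB arr).length = backB arr (lvalsB arr) := by
    rw [← hbT]; exact List.take_length
  simp only [longestUp, hM]
  rw [List.mem_flatMap]
  have hmemzip : ∀ p, p ∈ (lvalsB arr).zip (backB arr (lvalsB arr))
      ↔ ∃ j, ∃ hj : j < (lvalsB arr).length,
          p = ((lvalsB arr)[j]'(by omega), (backB arr (lvalsB arr))[j]'(by omega)) := by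
    intro p
    have := zip_take_mem (lvalsB arr) (backB arr (lvalsB arr)) hbT
      (lvalsB arr).length (le_refl _) p
    rwa [hTk] at this
  constructor
  · rintro ⟨q, hqf, hsq⟩
    rw [List.mem_filter] at hqf
    obtain ⟨hqz, hqM⟩ := hqf
    simp only [decide_eq_true_eq] at hqM
    obtain ⟨j, hj, rfl⟩ := (hmemzip q).mp hqz
    have hjn : j < arr.length := by omega
    have hmb := (mem_back arr j hjn s).mp hsq
    exact ⟨endsAt_good arr j s hmb.1, by rw [hmb.2]; exact hqM⟩
  · rintro ⟨⟨hsub, hch⟩, hlen⟩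
    have hM1 : 1 ≤ M := by
      have hmem := PySem.List.max?_mem hM
      obtain ⟨k, hk, hkM⟩ := List.mem_iff_getElem.mp hmem
      have := lvals_pos arr k (by omega)
      rw [← hkM]
      exact this
    rcases List.eq_nil_or_concat' s with rfl | ⟨s'', b, rfl⟩
    · simp at hlen; omega
    · obtain ⟨j, hjn, hbj, hsub''⟩ := occ arr s'' b hsub
      have hgdj : arr.getD j 0 = arr[j] := List.getD_eq_getElem arr 0 hjn
      have hend : EndsAt arr j (s'' ++ [b]) := ⟨hjn, hch, s'', hsub'', by rw [hgdj, hbj]⟩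
      have hle := le_lvals arr j (s'' ++ [b]) hend
      have hLjM : (lvalsB arr)[j]'(by omega) ≤ M := by
        have := PySem.List.max?_isMax hM ((lvalsB arr)[j]'(by omega)) (List.getElem_mem _)
        exact this
      have hlenLj : ((s'' ++ [b]).length : Int) = (lvalsB arr)[j]'(by omega) := by omega
      have hmb := (mem_back arr j hjn (s'' ++ [b])).mpr ⟨hend, hlenLj⟩
      refine ⟨((lvalsB arr)[j]'(by omega), (backB arr (lvalsB arr))[j]'(by omega)), ?_, hmb⟩
      rw [List.mem_filter]
      refine ⟨(hmemzip _).mpr ⟨j, by omega, rfl⟩, ?_⟩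
      simp only [decide_eq_true_eq]
      omega

-- ---------- bridge and assembly ----------

lemma maxN_eq_M (arr : List Int) (h : arr ≠ []) (M : Int)
    (hM : PySem.List.max? (lvalsB arr) (fun x => x) = some M) :
    (maxN (cands none arr) : Int) = M := by
  have hL : (lvalsB arr).length = arr.length := lvals_length arr
  have hn : 0 < arr.length := List.length_pos_of_ne_nil h
  -- maxN ≤ M
  have hle : (maxN (cands none arr) : Int) ≤ M := by
    obtain ⟨c, hc, hcm⟩ := maxN_attained (cands none arr) (cands_ne_nil none arr)
    obtain ⟨hcsub, hcch, -⟩ := (mem_cands none arr c).mp hc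
    rcases List.eq_nil_or_concat' c with rfl | ⟨c', b, rfl⟩
    · rw [← hcm]
      simp only [List.length_nil, Nat.cast_zero]
      have hmem := PySem.List.max?_mem hM
      obtain ⟨k, hk, hkM⟩ := List.mem_iff_getElem.mp hmem
      have := lvals_pos arr k (by omega)
      omega
    · obtain ⟨j, hjn, hbj, hsub'⟩ := occ arr c' b hcsub
      have hgdj : arr.getD j 0 = arr[j] := List.getD_eq_getElem arr 0 hjn
      have hend : EndsAt arr j (c' ++ [b]) := ⟨hjn, hcch, c', hsub', by rw [hgdj, hbj]⟩
      have h2 := le_lvals arr j (c' ++ [b]) hend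
      have h3 := PySem.List.max?_isMax hM ((lvalsB arr)[j]'(by omega)) (List.getElem_mem _)
      rw [← hcm]
      omega
  -- M ≤ maxN
  have hge : M ≤ (maxN (cands none arr) : Int) := by
    have hmem := PySem.List.max?_mem hM
    obtain ⟨k, hk, hkM⟩ := List.mem_iff_getElem.mp hmem
    obtain ⟨s, hend, hlen⟩ := exists_lvals arr k (by omega)
    have hgood := endsAt_good arr k s hend
    have hscand : s ∈ cands none arr :=
      (mem_cands none arr s).mpr ⟨hgood.1, hgood.2, fun v h hv => by cases hv⟩
    have := maxN_le (cands none arr) s hscand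
    rw [hkM] at hlen
    omega
  omega

lemma mem_getAll_iff_longestUp (arr s : List Int) (h : arr ≠ []) :
    s ∈ getAll [] arr 0 [] ↔ s ∈ longestUp arr := by
  have hL : (lvalsB arr).length = arr.length := lvals_length arr
  have hn : 0 < arr.length := List.length_pos_of_ne_nil h
  have hne : lvalsB arr ≠ [] := by
    intro h0
    rw [h0] at hL
    simp at hL
    omega
  rcases hM : PySem.List.max? (lvalsB arr) (fun x => x) with - | M
  · rw [PySem.List.max?_eq_none_iff] at hM
    exact absurd hM hne
  · rw [mem_getAll, mem_longestUp arr M hM]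
    have hMN := maxN_eq_M arr h M hM
    constructor
    · rintro ⟨hg, hlen⟩
      refine ⟨hg, ?_⟩
      rw [hlen]
      exact hMN
    · rintro ⟨hg, hlen⟩
      refine ⟨hg, ?_⟩
      have : (s.length : Int) = (maxN (cands none arr) : Int) := by rw [hlen, hMN]
      exact_mod_cast this

lemma mem_foldl_union {α β : Type} [BEq α] [LawfulBEq α] (g : β → List α) (l : List β)
    (s : PySem.Set α) (x : α) :
    x ∈ l.foldl (fun s m => PySem.Set.union s (g m)) s ↔ x ∈ s ∨ ∃ m ∈ l, x ∈ g m := by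
  induction l generalizing s with
  | nil => simp
  | cons m l ih =>
    simp only [List.foldl_cons]
    rw [ih]
    rw [PySem.Set.mem_union]
    constructor
    · rintro ((hx | hx) | ⟨m', hm', hx⟩)
      · exact Or.inl hx
      · exact Or.inr ⟨m, by simp, hx⟩
      · exact Or.inr ⟨m', by simp [hm'], hx⟩
    · rintro (hx | ⟨m', hm', hx⟩)
      · exact Or.inl (Or.inl hx)
      · rcases List.mem_cons.1 hm' with rfl | hm'
        · exact Or.inl (Or.inr hx)
        · exact Or.inr ⟨m', hm', hx⟩

lemma nodup_foldl_union {α β : Type} [BEq α] [LawfulBEq α] (g : β → List α) (l : List β)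
    (s : PySem.Set α) (h : s.Nodup) :
    (l.foldl (fun s m => PySem.Set.union s (g m)) s).Nodup := by
  induction l generalizing s with
  | nil => exact h
  | cons m l ih =>
    simp only [List.foldl_cons]
    exact ih _ (PySem.Set.nodup_union _ _ h)


lemma sorted_union_congr {b : Type} (mids : List b) (gA gB : b -> List String)
    (hg : forall m, m ∈ mids -> forall x, x ∈ gA m ↔ x ∈ gB m) :
    PySem.List.sorted (mids.foldl (fun s m => PySem.Set.union s (gA m)) PySem.Set.empty) (fun s => s) false
      = PySem.List.sorted (mids.foldl (fun s m => PySem.Set.union s (gB m)) PySem.Set.empty) (fun s => s) false := by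
  have hA := nodup_foldl_union gA mids PySem.Set.empty List.nodup_nil
  have hB := nodup_foldl_union gB mids PySem.Set.empty List.nodup_nil
  have hperm : (mids.foldl (fun s m => PySem.Set.union s (gA m)) PySem.Set.empty).Perm
      (mids.foldl (fun s m => PySem.Set.union s (gB m)) PySem.Set.empty) := by
    rw [List.perm_ext_iff_of_nodup hA hB]
    intro x
    rw [mem_foldl_union, mem_foldl_union]
    constructor
    · rintro (hx | ⟨m, hm, hx⟩)
      · simp [PySem.Set.empty] at hx
      · exact Or.inr ⟨m, hm, (hg m hm x).mp hx⟩
    · rintro (hx | ⟨m, hm, hx⟩)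
      · simp [PySem.Set.empty] at hx
      · exact Or.inr ⟨m, hm, (hg m hm x).mpr hx⟩
  apply PySem.List.eq_of_perm_of_pairwise_le_of_injective (fun s => s) (fun a b h => h)
  · exact ((PySem.List.sorted_perm _ _ _).trans hperm).trans (PySem.List.sorted_perm _ _ _).symm
  · exact PySem.List.sorted_pairwise _ _
  · exact PySem.List.sorted_pairwise _ _

-- ===== VERDICT (by name: the statement is the Claim_ definition above) =====
theorem solve_spec : Claim_equal_solve := by
  intro nums _ hpre
  unfold Spec_solve
  have hn : 0 < nums.length := List.length_pos_of_ne_nil hpre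
  rcases hm : PySem.List.max? ((List.range nums.length).map
      (fun i => (longSub nums).getD i 0 + ((longSub nums.reverse).reverse).getD i 0))
      (fun x => x) with - | maxlen
  · rw [PySem.List.max?_eq_none_iff] at hm
    rw [List.map_eq_nil_iff, List.range_eq_nil] at hm
    omega
  · have hmid : getMid nums = (List.range nums.length).filter
        (fun i => decide ((longSub nums).getD i 0 + ((longSub nums.reverse).reverse).getD i 0 = maxlen)) := by
      simp only [getMid]
      rw [hm]
    simp only [solve, solve_alt, if_neg hpre]
    rw [hm, hmid]
    dsimp only
    rw [PySem.List.foldl_ite_eq_foldl_filter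
      (p := fun mid => (longSub nums).getD mid 0 + ((longSub nums.reverse).reverse).getD mid 0 = maxlen)
      (f := fun ans mid => PySem.Set.union ans
        (((longestUp (nums.take (mid + 1))).flatMap
          (fun l => (longestUp ((nums.drop mid).reverse)).map
            (fun r => joinNums (l ++ r.reverse.drop 1))))))]
    apply sorted_union_congr
    intro mid hmid' x
    have hmn : mid < nums.length := by
      have := List.mem_filter.mp hmid'
      simpa using List.mem_range.mp this.1
    have hsubl : nums.take (mid + 1) ≠ [] := by
      apply List.ne_nil_of_length_pos
      simp
      omega
    have hsubr : (nums.drop mid).reverse ≠ [] := by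
      apply List.ne_nil_of_length_pos
      simp
      omega
    simp only [List.mem_flatMap, List.mem_map]
    constructor
    · rintro ⟨l, hl, r, hr, rfl⟩
      exact ⟨l, (mem_getAll_iff_longestUp _ l hsubl).mp hl,
             r, (mem_getAll_iff_longestUp _ r hsubr).mp hr, rfl⟩
    · rintro ⟨l, hl, r, hr, rfl⟩
      exact ⟨l, (mem_getAll_iff_longestUp _ l hsubl).mpr hl,
             r, (mem_getAll_iff_longestUp _ r hsubr).mpr hr, rfl⟩
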